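-- pv_equiv track=rewrite | github.com/yxy6465/language-classification | features_collection.py | find_consecutive_letter
-- ===== SOURCE A (Python) =====
-- def find_consecutive_letter(line):
--     """
--     count the number of consecutive letters of the line.
--     :param line: the sentence
--     :return: the range of the number of consecutive vowels and consecutive consonants
--     """
--     list_vowels = ["a", "e", "i", "o", "u"]
--
--     vowels_count = 0
--     consonants_count = 0
--
--     for i in range(len(line) - 1):
--
--         letter = line[i]
--         next_letter = line[i+1]
--         if letter in list_vowels and next_letter == letter:
--             vowels_count += 1
--         elif letter == next_letter:
--             consonants_count += 1
--
--     return define_range(vowels_count), define_range(consonants_count)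
--
-- def define_range(value):
--     """
--     Create the range for classification.
--     :param value: the value
--     :return: the range that the value is in
--     """
--     range1 = (0, 3)
--     range2 = (4, 7)
--     range3 = (8, None)
--
--     if value <= range1[1]:
--         return range1
--     if range2[0] <= value <= range2[1]:
--         return range2
--     return range3
-- ===== SOURCE B (Python) =====
-- def find_consecutive_letter(line):
--     """Run-length scan: advance to the end of each maximal run of equal
--     characters; a run of length L contributes L-1 repeats to the vowel or
--     consonant bucket depending on its character."""
--     vowels = set("aeiou")
--     vowels_count = 0
--     consonants_count = 0
--     i = 0
--     n = len(line)
--     while i < n: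
--         j = i + 1
--         while j < n and line[j] == line[i]:
--             j += 1
--         if line[i] in vowels:
--             vowels_count += j - i - 1
--         else:
--             consonants_count += j - i - 1
--         i = j
--     return define_range(vowels_count), define_range(consonants_count)
--
-- def define_range(value):
--     range1 = (0, 3)
--     range2 = (4, 7)
--     range3 = (8, None)
--     if value <= range1[1]:
--         return range1
--     if range2[0] <= value <= range2[1]:
--         return range2
--     return range3
-- ===== Notes on version B (the rewrite author's own statement) =====
-- stated objective: alternative
-- what changed: Replaces the adjacent-pair comparison loop with a run-length scan that jumps to the end of each maximal run of equal characters and adds length-1 to the vowel or consonant bucket.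
import Mathlib
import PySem

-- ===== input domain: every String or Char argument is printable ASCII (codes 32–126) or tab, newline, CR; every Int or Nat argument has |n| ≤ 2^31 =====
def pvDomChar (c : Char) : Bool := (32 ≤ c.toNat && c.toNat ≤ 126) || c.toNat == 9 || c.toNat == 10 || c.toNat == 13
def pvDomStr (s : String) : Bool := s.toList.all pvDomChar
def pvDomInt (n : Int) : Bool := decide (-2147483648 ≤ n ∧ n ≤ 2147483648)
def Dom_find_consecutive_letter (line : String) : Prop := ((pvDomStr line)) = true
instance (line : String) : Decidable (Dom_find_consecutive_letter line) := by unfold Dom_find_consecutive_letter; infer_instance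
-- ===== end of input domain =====

-- B re-implements the adjacent-pair scan as a run-length scan (same O(n) cost, different traversal); equal results proved below.

-- shared helper (identical in Source A and Source B): bucket a count into (0,3) / (4,7) / (8,None)
def define_range (value : Int) : Int × Option Int :=
  if value ≤ 3 then (0, some 3)
  else if 4 ≤ value ∧ value ≤ 7 then (4, some 7)
  else (8, none)

def list_vowels : List Char := ['a', 'e', 'i', 'o', 'u']

-- ===== PORT A =====
-- A's loop over i in range(len-1) comparing line[i] with line[i+1], accumulating the two counters
def loopA : List Char → Int → Int → Int × Int
  | c :: d :: rest, vc, cc =>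
    if c ∈ list_vowels ∧ d = c then loopA (d :: rest) (vc + 1) cc
    else if c = d then loopA (d :: rest) vc (cc + 1)
    else loopA (d :: rest) vc cc
  | _, vc, cc => (vc, cc)

def find_consecutive_letter (line : String) : (Int × Option Int) × (Int × Option Int) :=
  let r := loopA line.toList 0 0
  (define_range r.1, define_range r.2)

-- ===== PORT B =====
-- B's inner while loop: count how many leading chars equal c, return the count and the remainder
def takeRun (c : Char) : List Char → Int × List Char
  | [] => (0, [])
  | d :: rest =>
    if d = c then
      let p := takeRun c rest
      (p.1 + 1, p.2)
    else (0, d :: rest)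

theorem takeRun_len (c : Char) (l : List Char) : (takeRun c l).2.length ≤ l.length := by
  induction l with
  | nil => simp [takeRun]
  | cons d rest ih =>
    simp only [takeRun]
    split
    · exact Nat.le_trans ih (Nat.le_succ _)
    · simp

-- B's outer while loop: one step per maximal run, adding (run length - 1) to a bucket
def loopB : List Char → Int → Int → Int × Int
  | [], vc, cc => (vc, cc)
  | c :: rest, vc, cc =>
    let p := takeRun c rest
    if c ∈ list_vowels then loopB p.2 (vc + p.1) cc
    else loopB p.2 vc (cc + p.1)
termination_by l => l.length
decreasing_by
  all_goals exact Nat.lt_succ_of_le (takeRun_len c rest)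

def find_consecutive_letter_alt (line : String) : (Int × Option Int) × (Int × Option Int) :=
  let r := loopB line.toList 0 0
  (define_range r.1, define_range r.2)

-- ===== PRECONDITION & SPEC =====
def Spec_find_consecutive_letter (line : String) (out : (Int × Option Int) × (Int × Option Int)) : Prop := out = find_consecutive_letter_alt line
instance (line : String) (out : (Int × Option Int) × (Int × Option Int)) : Decidable (Spec_find_consecutive_letter line out) := by unfold Spec_find_consecutive_letter; infer_instance

-- ===== CLAIM (what is proved, stated in full; the proofs are below) =====
def Claim_equal_find_consecutive_letter : Prop := ∀ (line : String), Dom_find_consecutive_letter line → Spec_find_consecutive_letter line (find_consecutive_letter line)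

-- ===== LEMMAS AND PROOFS =====

-- A's pairwise scan, started at the head of a run, consumes the whole run adding (run length - 1)
theorem loopA_run (rest : List Char) : ∀ (c : Char) (vc cc : Int),
    loopA (c :: rest) vc cc =
      (if c ∈ list_vowels then loopA (takeRun c rest).2 (vc + (takeRun c rest).1) cc
       else loopA (takeRun c rest).2 vc (cc + (takeRun c rest).1)) := by
  induction rest with
  | nil =>
    intro c vc cc
    simp [loopA, takeRun]
  | cons d rest' ih =>
    intro c vc cc
    by_cases hdc : d = c
    · subst hdc
      have ht : takeRun d (d :: rest') = ((takeRun d rest').1 + 1, (takeRun d rest').2) := by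
        simp [takeRun]
      have hA : loopA (d :: d :: rest') vc cc =
          if d ∈ list_vowels then loopA (d :: rest') (vc + 1) cc
          else loopA (d :: rest') vc (cc + 1) := by
        simp [loopA]
      rw [ht, hA]
      by_cases hv : d ∈ list_vowels
      · rw [if_pos hv, if_pos hv, ih d (vc + 1) cc, if_pos hv]
        congr 1
        ring
      · rw [if_neg hv, if_neg hv, ih d vc (cc + 1), if_neg hv]
        congr 1
        ring
    · have hcd : ¬ c = d := fun h => hdc h.symm
      have ht : takeRun c (d :: rest') = (0, d :: rest') := by
        simp [takeRun, hdc]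
      have hA : loopA (c :: d :: rest') vc cc = loopA (d :: rest') vc cc := by
        simp [loopA, hdc, hcd]
      rw [ht, hA]
      split <;> simp

-- the two loops agree on every char list and accumulators
theorem loopA_eq_loopB (l : List Char) (vc cc : Int) : loopA l vc cc = loopB l vc cc := by
  fun_induction loopB l vc cc with
  | case1 vc cc => simp [loopA]
  | case2 c rest vc cc p hv ih => rw [loopA_run, if_pos hv]; exact ih
  | case3 c rest vc cc p hv ih => rw [loopA_run, if_neg hv]; exact ih

-- ===== VERDICT (by name: the statement is the Claim_ definition above) =====
theorem find_consecutive_letter_spec : Claim_equal_find_consecutive_letter := by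
  intro line _
  unfold Spec_find_consecutive_letter find_consecutive_letter find_consecutive_letter_alt
  rw [loopA_eq_loopB]
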